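-- pv_equiv track=rewrite | github.com/itsf4llofstars/audible_chess | src/pgn_parsers.py | get_black_wins
-- ===== SOURCE A (Python) =====
-- pattern = {
--     "start": "1. ",
--     "min_move": " 20. ",
--     "max_move": " 40. ",  # NOTE: Must be removed for final release. Must be 40 for tests
--     "paren_o": "(",
--     "paren_c": ")",
--     "brace_o": "{",
--     "brace_c": "}",
--     "bracket_o": "[",
--     "bracket_c": "]",
--     "tag_o": "<",
--     "tag_c": ">",
--     "white_wins": " 1-0",
--     "black_wins": " 0-1",
--     "hash": "#",
-- }
--
-- def get_black_wins(games):
--     """docstring"""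
--     index = 0
--     while index < len(games):
--         if pattern["hash"] in games[index]:
--             games.pop(index)
--             index -= 1
--         elif games[index].endswith(pattern["white_wins"]):
--             games.pop(index)
--             index -= 1
--         elif not games[index].endswith(pattern["black_wins"]):
--             games.pop(index)
--             index -= 1
--         index += 1
--     return games
-- ===== SOURCE B (Python) =====
-- def get_black_wins(games):
--     """docstring"""
--     # In-place two-pointer compaction: write each surviving game at the
--     # write cursor w, then truncate the same list object.
--     w = 0
--     for g in games:
--         if "#" not in g and not g.endswith(" 1-0") and g.endswith(" 0-1"):
--             games[w] = g
--             w += 1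
--     del games[w:]
--     return games
-- ===== Notes on version B (the rewrite author's own statement) =====
-- stated objective: faster
-- what changed: Replaces A's pop-and-rewind removal loop (each list.pop(i) shifts the whole tail) with a single-pass two-pointer in-place compaction (write cursor + one final truncation).
import Mathlib
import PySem

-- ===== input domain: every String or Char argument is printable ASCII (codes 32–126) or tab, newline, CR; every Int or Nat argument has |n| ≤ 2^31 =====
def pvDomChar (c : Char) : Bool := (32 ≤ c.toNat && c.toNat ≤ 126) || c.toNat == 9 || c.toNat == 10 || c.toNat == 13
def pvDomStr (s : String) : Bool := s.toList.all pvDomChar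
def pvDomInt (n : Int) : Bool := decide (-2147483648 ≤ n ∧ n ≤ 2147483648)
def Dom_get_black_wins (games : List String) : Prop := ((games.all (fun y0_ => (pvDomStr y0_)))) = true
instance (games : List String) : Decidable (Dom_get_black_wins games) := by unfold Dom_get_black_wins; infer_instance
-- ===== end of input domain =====

-- B replaces A's pop-and-rewind removal loop with a single-pass in-place
-- two-pointer compaction (write cursor + final truncation); both mutate the
-- input list in Python, and the equivalence proved here is about the return value.


-- ===== PORT A =====
-- A's while loop: 'games.pop(index)' followed by 'index -= 1' and the trailing
-- 'index += 1' cancel (Python ints), so each pop-branch recurses with the SAME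
-- index on the shortened list; the keep-branch recurses with index + 1.
-- 'games.pop(index)' with 0 ≤ index < len(games) is exactly List.eraseIdx.
def pvLoopA (games : List String) (index : Nat) : List String :=
  if h : index < games.length then
    if PySem.Str.isIn "#" games[index] then
      pvLoopA (games.eraseIdx index) index
    else if PySem.Str.endswith games[index] " 1-0" then
      pvLoopA (games.eraseIdx index) index
    else if !(PySem.Str.endswith games[index] " 0-1") then
      pvLoopA (games.eraseIdx index) index
    else
      pvLoopA games (index + 1)
  else games
termination_by games.length - index
decreasing_by
  · rw [List.length_eraseIdx_of_lt h]; omega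
  · rw [List.length_eraseIdx_of_lt h]; omega
  · rw [List.length_eraseIdx_of_lt h]; omega
  · omega

def get_black_wins (games : List String) : List String :=
  pvLoopA games 0

-- ===== PORT B =====
def get_black_wins_alt (games : List String) : List String :=
  let st := games.foldl
    (fun (st : List String × Nat) g =>
      if !(PySem.Str.isIn "#" g) && !(PySem.Str.endswith g " 1-0")
          && PySem.Str.endswith g " 0-1" then
        (st.1.set st.2 g, st.2 + 1)      -- games[w] = g; w += 1
      else st)
    (games, 0)
  st.1.take st.2                          -- del games[w:]

-- ===== PRECONDITION & SPEC =====
def Spec_get_black_wins (games : List String) (out : List String) : Prop := out = get_black_wins_alt games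
instance (games : List String) (out : List String) : Decidable (Spec_get_black_wins games out) := by unfold Spec_get_black_wins; infer_instance

-- ===== CLAIM (what is proved, stated in full; the proofs are below) =====
def Claim_equal_get_black_wins : Prop := ∀ (games : List String), Dom_get_black_wins games → Spec_get_black_wins games (get_black_wins games)

-- ===== LEMMAS AND PROOFS =====

/-- The surviving-game predicate, shared by both loop characterisations. -/
def pvKeep (g : String) : Bool :=
  !(PySem.Str.isIn "#" g) && !(PySem.Str.endswith g " 1-0")
    && PySem.Str.endswith g " 0-1"

/-- A's loop from position `index`: prefix already kept, rest gets filtered. -/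
theorem pvLoopA_eq (games : List String) (index : Nat) :
    pvLoopA games index = games.take index ++ (games.drop index).filter pvKeep := by
  by_cases h : index < games.length
  · rw [pvLoopA]
    have hdrop : games.drop index = games[index] :: games.drop (index + 1) :=
      List.drop_eq_getElem_cons h
    have herase : games.eraseIdx index = games.take index ++ games.drop (index + 1) :=
      List.eraseIdx_eq_take_drop_succ games index
    have hlen : (games.take index).length = index := by simp; omega
    simp only [h, dif_pos]
    by_cases h1 : PySem.Str.isIn "#" games[index] = true
    · have hk : pvKeep games[index] = false := by
        simp only [pvKeep, h1, Bool.not_true, Bool.false_and]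
      rw [if_pos h1, pvLoopA_eq (games.eraseIdx index) index, herase,
        List.take_append_of_le_length (by omega),
        List.drop_append_of_le_length (by omega), hdrop, List.filter_cons]
      simp [hk, List.take_take]
    · have h1f : PySem.Str.isIn "#" games[index] = false := Bool.eq_false_iff.mpr h1
      rw [if_neg h1]
      by_cases h2 : PySem.Str.endswith games[index] " 1-0" = true
      · have hk : pvKeep games[index] = false := by
          simp only [pvKeep, h1f, h2, Bool.not_true, Bool.not_false,
            Bool.true_and, Bool.false_and]
        rw [if_pos h2, pvLoopA_eq (games.eraseIdx index) index, herase,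
          List.take_append_of_le_length (by omega),
          List.drop_append_of_le_length (by omega), hdrop, List.filter_cons]
        simp [hk, List.take_take]
      · have h2f : PySem.Str.endswith games[index] " 1-0" = false := Bool.eq_false_iff.mpr h2
        rw [if_neg h2]
        by_cases h3 : PySem.Str.endswith games[index] " 0-1" = true
        · have hk : pvKeep games[index] = true := by
            simp only [pvKeep, h1f, h2f, h3, Bool.not_false, Bool.and_true]
          rw [if_neg (by simp only [h3, Bool.not_true]; exact Bool.false_ne_true),
            pvLoopA_eq games (index + 1), hdrop, List.filter_cons]
          rw [List.take_add_one, List.getElem?_eq_getElem h]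
          simp only [hk, if_true, Option.toList_some, List.append_assoc, List.singleton_append]
        · have h3f : PySem.Str.endswith games[index] " 0-1" = false := Bool.eq_false_iff.mpr h3
          have hk : pvKeep games[index] = false := by
            simp only [pvKeep, h3f, Bool.and_false]
          rw [if_pos (by simp only [h3f, Bool.not_false]),
            pvLoopA_eq (games.eraseIdx index) index, herase,
            List.take_append_of_le_length (by omega),
            List.drop_append_of_le_length (by omega), hdrop, List.filter_cons]
          simp [hk, List.take_take]
  · rw [pvLoopA]
    simp only [h, dif_neg, not_false_iff]
    rw [List.take_of_length_le (by omega), List.drop_of_length_le (by omega)]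
    simp
termination_by games.length - index
decreasing_by
  all_goals first
    | (rw [List.length_eraseIdx_of_lt h]; omega)
    | omega

/-- Writing at `n < l.length` and taking one element more appends the write. -/
theorem pvTakeSetSucc (l : List String) (n : Nat) (x : String) (h : n < l.length) :
    (l.set n x).take (n+1) = l.take n ++ [x] := by
  rw [List.take_add_one, List.take_set, List.set_eq_of_length_le (by simp)]
  simp [List.getElem?_set_self h]

/-- Invariant of B's compaction fold: the written prefix is the filter. -/
theorem pvFoldB_eq (l : List String) (buf : List String) (w : Nat)
    (hw : w + l.length ≤ buf.length) :
    (l.foldl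
      (fun (st : List String × Nat) g =>
        if !(PySem.Str.isIn "#" g) && !(PySem.Str.endswith g " 1-0")
            && PySem.Str.endswith g " 0-1" then
          (st.1.set st.2 g, st.2 + 1)
        else st)
      (buf, w)).1.take
    (l.foldl
      (fun (st : List String × Nat) g =>
        if !(PySem.Str.isIn "#" g) && !(PySem.Str.endswith g " 1-0")
            && PySem.Str.endswith g " 0-1" then
          (st.1.set st.2 g, st.2 + 1)
        else st)
      (buf, w)).2 = buf.take w ++ l.filter pvKeep := by
  induction l generalizing buf w with
  | nil => simp
  | cons g rest ih =>
    by_cases hg : pvKeep g = true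
    · have hg' : (!(PySem.Str.isIn "#" g) && !(PySem.Str.endswith g " 1-0")
          && PySem.Str.endswith g " 0-1") = true := hg
      have hlt : w < buf.length := by simp at hw; omega
      simp only [List.foldl_cons, List.filter_cons, hg', hg, if_true]
      rw [ih (buf.set w g) (w + 1) (by simp at hw ⊢; omega),
        pvTakeSetSucc buf w g hlt]
      simp
    · have hg' : (!(PySem.Str.isIn "#" g) && !(PySem.Str.endswith g " 1-0")
          && PySem.Str.endswith g " 0-1") = false := Bool.eq_false_iff.mpr hg
      simp only [List.foldl_cons, List.filter_cons, hg', Bool.false_eq_true, if_false, hg]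
      exact ih buf w (by simp at hw ⊢; omega)

-- ===== VERDICT (by name: the statement is the Claim_ definition above) =====
theorem get_black_wins_spec : Claim_equal_get_black_wins := by
  intro games _
  unfold Spec_get_black_wins get_black_wins get_black_wins_alt
  rw [pvLoopA_eq games 0, pvFoldB_eq games games 0 (by omega)]
  simp
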